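-- pv_equiv track=rewrite | github.com/pypi-data/pypi-mirror-397 | packages/mcp-airflow-api/mcp_airflow_api-3.5.2.tar.gz/mcp_airflow_api-3.5.2/src/mcp_airflow_api/functions.py | parse_prompt_sections
-- ===== SOURCE A (Python) =====
-- def parse_prompt_sections(template: str):
--     """
--     Parses the prompt template into section headings and sections.
--     Returns (headings, sections).
--     """
--     lines = template.splitlines()
--     sections = []
--     current = []
--     headings = []
--     for line in lines:
--         if line.startswith("## "):
--             if current:
--                 sections.append("\n".join(current))
--                 current = []
--             headings.append(line[3:].strip())
--             current.append(line)
--         else: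
--             current.append(line)
--     if current:
--         sections.append("\n".join(current))
--     return headings, sections
-- ===== SOURCE B (Python) =====
-- def parse_prompt_sections(template: str):
--     """
--     Parses the prompt template into section headings and sections.
--     Returns (headings, sections).
--     """
--     lines = template.splitlines()
--     headings = [line[3:].strip() for line in lines if line.startswith("## ")]
--     sections = []
--     i, n = 0, len(lines)
--     while i < n:
--         j = i + 1
--         while j < n and not lines[j].startswith("## "):
--             j += 1
--         sections.append("\n".join(lines[i:j]))
--         i = j
--     return headings, sections
-- ===== Notes on version B (the rewrite author's own statement) =====
-- stated objective: alternative
-- what changed: A threads one accumulator loop that flushes its line buffer at each heading; B collects headings with a single comprehension and builds sections by a two-pointer scan that slices the line list between consecutive headings.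
import Mathlib
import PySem

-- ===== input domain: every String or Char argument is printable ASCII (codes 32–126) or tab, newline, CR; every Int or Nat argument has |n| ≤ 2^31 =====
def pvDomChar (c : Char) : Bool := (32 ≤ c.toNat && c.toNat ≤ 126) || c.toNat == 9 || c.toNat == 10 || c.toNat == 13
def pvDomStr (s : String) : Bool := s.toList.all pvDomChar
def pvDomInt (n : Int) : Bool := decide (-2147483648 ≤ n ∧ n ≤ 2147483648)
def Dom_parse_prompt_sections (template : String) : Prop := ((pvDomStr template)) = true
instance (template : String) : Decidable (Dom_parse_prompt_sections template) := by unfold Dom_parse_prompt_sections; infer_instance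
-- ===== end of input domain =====

-- B replaces A's flush-at-heading accumulator loop by a heading comprehension plus a
-- two-pointer slicing scan over the line list (alternative decomposition, same cost).


-- ===== PORT A =====
-- state = (sections, current, headings), exactly A's three lists
def pvStepA (st : List String × List String × List String) (line : String) :
    List String × List String × List String :=
  let sections := st.1
  let current := st.2.1
  let headings := st.2.2
  if PySem.Str.startswith line "## " then
    let (sections, current) :=
      if current ≠ [] then (sections ++ [PySem.Str.join "\n" current], ([] : List String))
      else (sections, current)
    (sections, current ++ [line],
      headings ++ [PySem.Str.strip (PySem.Str.slice line (some 3) none)])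
  else
    (sections, current ++ [line], headings)

def parse_prompt_sections (template : String) : List String × List String :=
  let lines := PySem.Str.splitlines template
  let st := lines.foldl pvStepA ([], [], [])
  let sections := if st.2.1 ≠ [] then st.1 ++ [PySem.Str.join "\n" st.2.1] else st.1
  (st.2.2, sections)

-- ===== PORT B =====
-- Source B's outer while loop: each iteration takes the group lines[i:j] (i plus the following
-- non-heading lines, found by the inner while) and continues at j; ported as recursion on the
-- suffix, lines[i+1:j] = takeWhile, lines[j:] = dropWhile.
def pvSecsB : List String → List String
  | [] => []
  | l :: rest =>
      PySem.Str.join "\n" (l :: rest.takeWhile (fun x => !(PySem.Str.startswith x "## "))) ::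
        pvSecsB (rest.dropWhile (fun x => !(PySem.Str.startswith x "## ")))
  termination_by ls => ls.length
  decreasing_by
    exact Nat.lt_succ_of_le (List.length_dropWhile_le _ _)

def parse_prompt_sections_alt (template : String) : List String × List String :=
  let lines := PySem.Str.splitlines template
  ((lines.filter (fun l => PySem.Str.startswith l "## ")).map
      (fun l => PySem.Str.strip (PySem.Str.slice l (some 3) none)),
    pvSecsB lines)

-- ===== PRECONDITION & SPEC =====
def Spec_parse_prompt_sections (template : String) (out : List String × List String) : Prop := out = parse_prompt_sections_alt template
instance (template : String) (out : List String × List String) : Decidable (Spec_parse_prompt_sections template out) := by unfold Spec_parse_prompt_sections; infer_instance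

-- ===== CLAIM (what is proved, stated in full; the proofs are below) =====
def Claim_equal_parse_prompt_sections : Prop := ∀ (template : String), Dom_parse_prompt_sections template → Spec_parse_prompt_sections template (parse_prompt_sections template)

-- ===== LEMMAS AND PROOFS =====

-- headings produced by B from a list of lines
def pvHeadsB (lines : List String) : List String :=
  (lines.filter (fun l => PySem.Str.startswith l "## ")).map
    (fun l => PySem.Str.strip (PySem.Str.slice l (some 3) none))

-- sections B would produce starting with a non-empty buffer `cur`
def pvSeed (cur lines : List String) : List String :=
  PySem.Str.join "\n" (cur ++ lines.takeWhile (fun x => !(PySem.Str.startswith x "## "))) ::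
    pvSecsB (lines.dropWhile (fun x => !(PySem.Str.startswith x "## ")))

-- A's final flush and result pair, applied to the loop state
def pvFinish (st : List String × List String × List String) : List String × List String :=
  (st.2.2, if st.2.1 ≠ [] then st.1 ++ [PySem.Str.join "\n" st.2.1] else st.1)

theorem pvSecsB_cons (l : String) (rest : List String) :
    pvSecsB (l :: rest) = pvSeed [l] rest := by
  rw [pvSecsB, pvSeed]
  rfl

-- A's loop, run from a non-empty buffer, produces exactly B's seeded result
theorem pvLoopA (lines : List String) :
    ∀ (sections cur heads : List String), cur ≠ [] →
      pvFinish (lines.foldl pvStepA (sections, cur, heads))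
      = (heads ++ pvHeadsB lines, sections ++ pvSeed cur lines) := by
  induction lines with
  | nil =>
      intro sections cur heads hcur
      simp [pvFinish, pvHeadsB, pvSeed, hcur, pvSecsB]
  | cons l rest ih =>
      intro sections cur heads hcur
      rw [List.foldl_cons]
      by_cases hl : PySem.Str.startswith l "## " = true
      · have hl' : PySem.Chars.startswith l.toList ['#', '#', ' '] = true := by simpa using hl
        have hstep : pvStepA (sections, cur, heads) l
            = (sections ++ [PySem.Str.join "\n" cur], [l],
               heads ++ [PySem.Str.strip (PySem.Str.slice l (some 3) none)]) := by
          simp [pvStepA, hl', hcur]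
        rw [hstep, ih _ _ _ (by simp)]
        simp [pvHeadsB, pvSeed, hl', pvSecsB_cons]
      · have hl' : PySem.Chars.startswith l.toList ['#', '#', ' '] = false := by simpa using hl
        have hstep : pvStepA (sections, cur, heads) l = (sections, cur ++ [l], heads) := by
          simp [pvStepA, hl']
        rw [hstep, ih _ _ _ (by simp)]
        simp [pvHeadsB, pvSeed, hl', List.append_assoc]

-- the whole of A (loop from the empty state + final flush) equals B on any line list
theorem pvMain (lines : List String) :
    pvFinish (lines.foldl pvStepA ([], [], [])) = (pvHeadsB lines, pvSecsB lines) := by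
  cases lines with
  | nil => simp [pvFinish, pvHeadsB, pvSecsB]
  | cons l rest =>
      rw [List.foldl_cons]
      by_cases hl : PySem.Str.startswith l "## " = true
      · have hl' : PySem.Chars.startswith l.toList ['#', '#', ' '] = true := by simpa using hl
        have hstep : pvStepA ([], [], []) l
            = ([], [l], [PySem.Str.strip (PySem.Str.slice l (some 3) none)]) := by
          simp [pvStepA, hl']
        rw [hstep, pvLoopA rest [] [l] _ (by simp)]
        simp [pvHeadsB, hl', pvSecsB_cons]
      · have hl' : PySem.Chars.startswith l.toList ['#', '#', ' '] = false := by simpa using hl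
        have hstep : pvStepA ([], [], []) l = ([], [l], []) := by
          simp [pvStepA, hl']
        rw [hstep, pvLoopA rest [] [l] [] (by simp)]
        simp [pvHeadsB, hl', pvSecsB_cons]

-- ===== VERDICT (by name: the statement is the Claim_ definition above) =====
theorem parse_prompt_sections_spec : Claim_equal_parse_prompt_sections := by
  intro template _
  exact pvMain (PySem.Str.splitlines template)
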